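-- pv_equiv track=rewrite | github.com/neilneil2000/Advent-of-code-2022 | Day 16/day_sixteen.py | calculate_total_flow_for_two
-- ===== SOURCE A (Python) =====
-- def calculate_total_flow(flow_rates: dict, valves_open: dict) -> int:
--     """
--     flow_rates is dictionary of Valve: Rate
--     valves_open is a dictionary of Valve: Time_left when open
--     """
--     total = 0
--     for valve_name, valve_time in valves_open.items():
--         total += valve_time * flow_rates[valve_name]
--     return total
--
-- def calculate_total_flow_for_two(
--     flow_rates: dict, valves_open: dict, valves_open_2: dict
-- ) -> int:
--     """
--     flow_rates is dictionary of Valve: Rate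
--     valves_open is a dictionary of Valve: Time_left when open
--     """
--     combined_valves_open = valves_open_2.copy()
--     for valve_name, valve_time in valves_open.items():
--         if combined_valves_open.get(valve_name) is not None:
--             combined_valves_open[valve_name] = max(
--                 valve_time, combined_valves_open[valve_name]
--             )
--         else:
--             combined_valves_open[valve_name] = valve_time
--
--     return calculate_total_flow(flow_rates, combined_valves_open)
-- ===== SOURCE B (Python) =====
-- def calculate_total_flow_for_two(
--     flow_rates: dict, valves_open: dict, valves_open_2: dict
-- ) -> int:
--     total = sum(flow_rates[v] * t for v, t in valves_open_2.items())
--     for v, t in valves_open.items():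
--         if v in valves_open_2:
--             extra = t - valves_open_2[v]
--             if extra > 0:
--                 total += flow_rates[v] * extra
--         else:
--             total += flow_rates[v] * t
--     return total
-- ===== Notes on version B (the rewrite author's own statement) =====
-- stated objective: simpler
-- what changed: B never builds the merged dictionary: it sums valves_open_2 directly and, in one pass over valves_open, adds each entry's full contribution if its key is absent from valves_open_2 and only its positive excess over the overlapping time otherwise.
import Mathlib
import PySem

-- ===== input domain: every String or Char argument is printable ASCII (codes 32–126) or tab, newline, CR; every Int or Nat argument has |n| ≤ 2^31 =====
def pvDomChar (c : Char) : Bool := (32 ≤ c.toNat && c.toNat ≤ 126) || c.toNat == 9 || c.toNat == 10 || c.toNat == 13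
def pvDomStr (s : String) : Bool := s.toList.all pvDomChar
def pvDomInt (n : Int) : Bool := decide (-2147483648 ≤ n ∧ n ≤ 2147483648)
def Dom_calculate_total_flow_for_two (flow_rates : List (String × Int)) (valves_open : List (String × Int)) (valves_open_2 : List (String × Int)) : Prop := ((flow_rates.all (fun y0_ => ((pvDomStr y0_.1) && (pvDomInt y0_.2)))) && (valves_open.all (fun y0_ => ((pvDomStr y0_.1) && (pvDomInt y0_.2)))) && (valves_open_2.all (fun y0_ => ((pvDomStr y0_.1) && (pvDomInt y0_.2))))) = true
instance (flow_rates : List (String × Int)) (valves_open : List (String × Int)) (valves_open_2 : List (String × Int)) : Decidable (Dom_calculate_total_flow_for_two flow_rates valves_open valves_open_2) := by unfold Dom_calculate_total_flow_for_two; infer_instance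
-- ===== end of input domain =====

-- B avoids A's intermediate merged dictionary: it sums valves_open_2 directly and adds each
-- valves_open entry's contribution (full, or the positive excess over the overlap) in one pass.
-- ===== PORT A =====
def calculate_total_flow (flow_rates : PySem.Dict String Int) (valves_open : PySem.Dict String Int) : Int :=
  valves_open.items.foldl (fun total p => total + p.2 * ((flow_rates.get? p.1).getD 0)) 0

def calculate_total_flow_for_two (flow_rates : List (String × Int)) (valves_open : List (String × Int)) (valves_open_2 : List (String × Int)) : Int :=
  let frd := PySem.Dict.ofList flow_rates
  let vod := PySem.Dict.ofList valves_open
  let vo2d := PySem.Dict.ofList valves_open_2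
  let combined := vod.items.foldl (fun c (p : String × Int) =>
      match c.get? p.1 with
      | some t => c.insert p.1 (max p.2 t)
      | none => c.insert p.1 p.2) vo2d
  calculate_total_flow frd combined

-- ===== PORT B =====
def calculate_total_flow_for_two_alt (flow_rates : List (String × Int)) (valves_open : List (String × Int)) (valves_open_2 : List (String × Int)) : Int :=
  let frd := PySem.Dict.ofList flow_rates
  let vod := PySem.Dict.ofList valves_open
  let vo2d := PySem.Dict.ofList valves_open_2
  let total := (vo2d.items.map (fun p => ((frd.get? p.1).getD 0) * p.2)).sum
  vod.items.foldl (fun total p =>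
      match vo2d.get? p.1 with
      | some t2 => if p.2 - t2 > 0 then total + ((frd.get? p.1).getD 0) * (p.2 - t2) else total
      | none => total + ((frd.get? p.1).getD 0) * p.2) total

-- ===== PRECONDITION & SPEC =====
-- Pre_ excludes exactly the inputs on which Python A raises KeyError: a valve name of either
-- open-valves dict missing from flow_rates.
def Pre_calculate_total_flow_for_two (flow_rates : List (String × Int)) (valves_open : List (String × Int)) (valves_open_2 : List (String × Int)) : Prop :=
  ∀ p ∈ valves_open ++ valves_open_2, p.1 ∈ flow_rates.map (·.1)
instance (flow_rates : List (String × Int)) (valves_open : List (String × Int)) (valves_open_2 : List (String × Int)) : Decidable (Pre_calculate_total_flow_for_two flow_rates valves_open valves_open_2) := by unfold Pre_calculate_total_flow_for_two; infer_instance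

def pvWitness_calculate_total_flow_for_two : (List (String × Int)) × (List (String × Int)) × (List (String × Int)) :=
  ([("AA", 3), ("BB", 5)], [("AA", 7), ("BB", 2)], [("BB", 4)])

def Spec_calculate_total_flow_for_two (flow_rates : List (String × Int)) (valves_open : List (String × Int)) (valves_open_2 : List (String × Int)) (out : Int) : Prop := out = calculate_total_flow_for_two_alt flow_rates valves_open valves_open_2
instance (flow_rates : List (String × Int)) (valves_open : List (String × Int)) (valves_open_2 : List (String × Int)) (out : Int) : Decidable (Spec_calculate_total_flow_for_two flow_rates valves_open valves_open_2 out) := by unfold Spec_calculate_total_flow_for_two; infer_instance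

-- ===== CLAIM (what is proved, stated in full; the proofs are below) =====
def Claim_equal_calculate_total_flow_for_two : Prop := ∀ (flow_rates : List (String × Int)) (valves_open : List (String × Int)) (valves_open_2 : List (String × Int)), Dom_calculate_total_flow_for_two flow_rates valves_open valves_open_2 → Pre_calculate_total_flow_for_two flow_rates valves_open valves_open_2 → Spec_calculate_total_flow_for_two flow_rates valves_open valves_open_2 (calculate_total_flow_for_two flow_rates valves_open valves_open_2)

-- ===== LEMMAS AND PROOFS =====

-- sum of A's weighted items, as a function of the evolving combined dict
def pvS (fr : PySem.Dict String Int) (c : PySem.Dict String Int) : Int :=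
  (c.items.map (fun p => p.2 * ((fr.get? p.1).getD 0))).sum

lemma pvSum_replace (fr : PySem.Dict String Int) (k : String) (v w : Int) :
    ∀ (l : List (String × Int)), (l.map (·.1)).Nodup → (k, w) ∈ l →
    ((l.map (fun p => if p.1 == k then (k, v) else p)).map (fun p => p.2 * ((fr.get? p.1).getD 0))).sum
      = (l.map (fun p => p.2 * ((fr.get? p.1).getD 0))).sum + (v - w) * ((fr.get? k).getD 0) := by
  intro l
  induction l with
  | nil => intro _ h; cases h
  | cons q t ih =>
    intro hnd hmem
    simp only [List.map_cons, List.nodup_cons, List.mem_map] at hnd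
    obtain ⟨hq, hndt⟩ := hnd
    rcases List.mem_cons.mp hmem with hqe | ht
    · have hk : q.1 = k := by rw [← hqe]
      have htid : t.map (fun p => if p.1 == k then (k, v) else p) = t := by
        apply List.map_congr_left ?_ |>.trans (List.map_id t)
        intro p hp
        have : p.1 ≠ k := fun h => hq ⟨p, hp, by rw [h, ← hk]⟩
        simp [this]
      simp only [List.map_cons, htid, List.sum_cons, BEq.rfl, if_true, ← hqe]
      ring
    · have hk : (q.1 == k) = false := by
        simp only [beq_eq_false_iff_ne, ne_eq]
        exact fun h => hq ⟨(k, w), ht, h.symm⟩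
      simp only [List.map_cons, List.sum_cons, hk, Bool.false_eq_true, if_false, ih hndt ht]
      ring

lemma pvS_insert_some (fr c : PySem.Dict String Int) (k : String) (v w : Int)
    (hnd : c.keys.Nodup) (h : c.get? k = some w) :
    pvS fr (c.insert k v) = pvS fr c + (v - w) * ((fr.get? k).getD 0) := by
  have hcont : c.contains k := by
    rw [PySem.Dict.contains_eq_isSome_get?, h]; rfl
  have hmem : (k, w) ∈ c.items := PySem.Dict.mem_items_of_get?_eq_some c h
  unfold pvS
  rw [PySem.Dict.items_insert_of_contains c v hcont]
  exact pvSum_replace fr k v w c.items hnd hmem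

lemma pvS_insert_none (fr c : PySem.Dict String Int) (k : String) (v : Int)
    (h : c.get? k = none) :
    pvS fr (c.insert k v) = pvS fr c + v * ((fr.get? k).getD 0) := by
  have hcont : c.contains k = false := by
    rw [PySem.Dict.contains_eq_isSome_get?, h]; rfl
  unfold pvS
  rw [PySem.Dict.items_insert_of_not_contains c v hcont]
  simp

lemma pvLoop_eq (fr vo2d : PySem.Dict String Int) :
    ∀ (l : List (String × Int)) (c : PySem.Dict String Int),
      c.keys.Nodup →
      (∀ p ∈ l, c.get? p.1 = vo2d.get? p.1) →
      (l.map (·.1)).Nodup →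
      pvS fr (l.foldl (fun c (p : String × Int) =>
          match c.get? p.1 with
          | some t => c.insert p.1 (max p.2 t)
          | none => c.insert p.1 p.2) c)
      = l.foldl (fun total p =>
          match vo2d.get? p.1 with
          | some t2 => if p.2 - t2 > 0 then total + ((fr.get? p.1).getD 0) * (p.2 - t2) else total
          | none => total + ((fr.get? p.1).getD 0) * p.2) (pvS fr c) := by
  intro l
  induction l with
  | nil => intro c _ _ _; rfl
  | cons q t ih =>
    intro c hnd hagree hlnd
    simp only [List.map_cons, List.nodup_cons, List.mem_map] at hlnd
    obtain ⟨hq, hndt⟩ := hlnd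
    have hq2 : c.get? q.1 = vo2d.get? q.1 := hagree q (List.mem_cons_self ..)
    simp only [List.foldl_cons]
    have hstep : ∀ (c' : PySem.Dict String Int) (acc : Int), c'.keys.Nodup →
        (∀ p ∈ t, c'.get? p.1 = vo2d.get? p.1) → pvS fr c' = acc →
        pvS fr (t.foldl (fun c (p : String × Int) =>
            match c.get? p.1 with
            | some t => c.insert p.1 (max p.2 t)
            | none => c.insert p.1 p.2) c')
        = t.foldl (fun total p =>
            match vo2d.get? p.1 with
            | some t2 => if p.2 - t2 > 0 then total + ((fr.get? p.1).getD 0) * (p.2 - t2) else total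
            | none => total + ((fr.get? p.1).getD 0) * p.2) acc := by
      intro c' acc h1 h2 h3
      rw [← h3]; exact ih c' h1 h2 hndt
    have hne : ∀ p ∈ t, p.1 ≠ q.1 := by
      intro p hp h; exact hq ⟨p, hp, h⟩
    cases hv : c.get? q.1 with
    | some tw =>
      have hv2 : vo2d.get? q.1 = some tw := hq2 ▸ hv
      simp only [hv2]
      apply hstep _ _ (PySem.Dict.nodup_keys_insert _ _ _ hnd)
        (fun p hp => by rw [PySem.Dict.get?_insert_of_ne _ _ (hne p hp), hagree p (List.mem_cons_of_mem _ hp)])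
      · rw [pvS_insert_some fr c q.1 (max q.2 tw) tw hnd hv]
        by_cases hgt : q.2 - tw > 0
        · have : max q.2 tw = q.2 := by omega
          rw [this, if_pos hgt]; ring
        · have : max q.2 tw = tw := by omega
          rw [this, if_neg hgt]; ring
    | none =>
      have hv2 : vo2d.get? q.1 = none := hq2 ▸ hv
      simp only [hv2]
      apply hstep _ _ (PySem.Dict.nodup_keys_insert _ _ _ hnd)
        (fun p hp => by rw [PySem.Dict.get?_insert_of_ne _ _ (hne p hp), hagree p (List.mem_cons_of_mem _ hp)])
      · rw [pvS_insert_none fr c q.1 q.2 hv]; ring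

-- ===== VERDICT (by name: the statement is the Claim_ definition above) =====
theorem calculate_total_flow_for_two_spec : Claim_equal_calculate_total_flow_for_two := by
  intro fr vo vo2 _ _
  unfold Spec_calculate_total_flow_for_two calculate_total_flow_for_two calculate_total_flow_for_two_alt calculate_total_flow
  have h := pvLoop_eq (PySem.Dict.ofList fr) (PySem.Dict.ofList vo2)
    (PySem.Dict.ofList vo).items (PySem.Dict.ofList vo2)
    (PySem.Dict.nodup_keys_ofList vo2) (fun _ _ => rfl)
    (PySem.Dict.nodup_keys_ofList vo)
  have hS : ∀ c : PySem.Dict String Int,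
      c.items.foldl (fun total p => total + p.2 * ((PySem.Dict.ofList fr).get? p.1).getD 0) 0
        = pvS (PySem.Dict.ofList fr) c := by
    intro c
    unfold pvS
    rw [PySem.List.foldl_add]
    simp
  rw [hS, h]
  unfold pvS
  have : (((PySem.Dict.ofList vo2).items.map (fun p => p.2 * (((PySem.Dict.ofList fr).get? p.1).getD 0))).sum)
       = (((PySem.Dict.ofList vo2).items.map (fun p => (((PySem.Dict.ofList fr).get? p.1).getD 0) * p.2)).sum) := by
    congr 1
    exact List.map_congr_left (fun p _ => mul_comm _ _)
  rw [this]
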